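-- pv_equiv track=rewrite | github.com/CrowbarInc/AI-DM-Ashen-Thrones- | game/prompt_context.py | _sentence_start_char_indices
-- ===== SOURCE A (Python) =====
-- def _sentence_start_char_indices(text: str) -> set[int]:
--     """Indices where a new sentence (or line) begins after punctuation or newline."""
--     starts = {0}
--     i = 0
--     n = len(text)
--     while i < n:
--         ch = text[i]
--         if ch in ".!?":
--             j = i + 1
--             while j < n and text[j] in "\"')]}":
--                 j += 1
--             while j < n and text[j].isspace():
--                 j += 1
--             if j < n:
--                 starts.add(j)
--             i = j
--             continue
--         if ch == "\n":
--             j = i + 1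
--             while j < n and text[j].isspace():
--                 j += 1
--             if j < n:
--                 starts.add(j)
--             i = j
--             continue
--         i += 1
--     return starts
-- ===== SOURCE B (Python) =====
-- def _sentence_start_char_indices(text: str) -> set[int]:
--     """Single pass: a state machine with expect/skip_closing flags replaces the nested advancing while-loops."""
--     starts = {0}
--     expect = False
--     skip_closing = False
--     for i, ch in enumerate(text):
--         if expect:
--             if skip_closing and ch in "\"')]}":
--                 continue
--             skip_closing = False
--             if ch.isspace():
--                 continue
--             starts.add(i)
--             expect = False
--         if ch in ".!?":
--             expect = True
--             skip_closing = True
--         elif ch == "\n":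
--             expect = True
--             skip_closing = False
--     return starts
-- ===== Notes on version B (the rewrite author's own statement) =====
-- stated objective: alternative
-- what changed: Replaced the index-jumping while-loop with nested closing/whitespace-skipping inner loops by a single for-pass over enumerate(text) driven by two booleans (expect_start, skip_closing), a flat state machine with no inner loops or index arithmetic.
import Mathlib
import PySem

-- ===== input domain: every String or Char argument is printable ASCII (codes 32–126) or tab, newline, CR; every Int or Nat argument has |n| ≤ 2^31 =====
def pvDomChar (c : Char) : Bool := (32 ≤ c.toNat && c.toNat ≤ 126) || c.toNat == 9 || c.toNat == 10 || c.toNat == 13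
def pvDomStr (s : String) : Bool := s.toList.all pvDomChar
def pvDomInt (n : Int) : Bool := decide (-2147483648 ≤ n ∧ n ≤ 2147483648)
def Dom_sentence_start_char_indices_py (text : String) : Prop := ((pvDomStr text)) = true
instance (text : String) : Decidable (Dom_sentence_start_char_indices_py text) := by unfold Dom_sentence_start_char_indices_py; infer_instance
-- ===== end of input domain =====

-- B replaces A's nested index-advancing while loops by one enumerate pass over the
-- characters with two state booleans (same O(n) cost, flat control flow).

-- ===== PORT A =====
def pvClosings : List Char := ['"', '\'', ')', ']', '}']
def pvPunct : List Char := ['.', '!', '?']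

-- while j < n and text[j] in "\"')]}": j += 1
def pvSkipClosing (cs : List Char) (j : Nat) : Nat :=
  if h : j < cs.length ∧ cs.getD j ' ' ∈ pvClosings then pvSkipClosing cs (j + 1) else j
termination_by cs.length - j
decreasing_by omega

-- while j < n and text[j].isspace(): j += 1
def pvSkipSpace (cs : List Char) (j : Nat) : Nat :=
  if h : j < cs.length ∧ PySem.Chars.isspace (cs.getD j ' ') = true then pvSkipSpace cs (j + 1) else j
termination_by cs.length - j
decreasing_by omega

theorem pvSkipClosing_ge (cs : List Char) (j : Nat) : j ≤ pvSkipClosing cs j := by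
  unfold pvSkipClosing
  split
  · have := pvSkipClosing_ge cs (j + 1); omega
  · omega
termination_by cs.length - j
decreasing_by omega

theorem pvSkipSpace_ge (cs : List Char) (j : Nat) : j ≤ pvSkipSpace cs j := by
  unfold pvSkipSpace
  split
  · have := pvSkipSpace_ge cs (j + 1); omega
  · omega
termination_by cs.length - j
decreasing_by omega

-- the main while loop of A
def pvLoopA (cs : List Char) (i : Nat) (starts : PySem.Set Int) : PySem.Set Int :=
  if hi : i < cs.length then
    let ch := cs.getD i ' '
    if ch ∈ pvPunct then
      let j := pvSkipSpace cs (pvSkipClosing cs (i + 1))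
      pvLoopA cs j (if j < cs.length then PySem.Set.add starts (j : Int) else starts)
    else if ch = '\n' then
      let j := pvSkipSpace cs (i + 1)
      pvLoopA cs j (if j < cs.length then PySem.Set.add starts (j : Int) else starts)
    else pvLoopA cs (i + 1) starts
  else starts
termination_by cs.length - i
decreasing_by
  · have h1 := pvSkipClosing_ge cs (i + 1)
    have h2 := pvSkipSpace_ge cs (pvSkipClosing cs (i + 1))
    omega
  · have h2 := pvSkipSpace_ge cs (i + 1)
    omega
  · omega

def sentence_start_char_indices_py (text : String) : List Int :=
  pvLoopA text.toList 0 (PySem.Set.ofList [0])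

-- ===== PORT B =====
-- one step of B's for-loop state machine: state = (starts, expect_start, skip_closing)
def pvStepB (st : PySem.Set Int × Bool × Bool) (p : Int × Char) : PySem.Set Int × Bool × Bool :=
  match st, p with
  | (starts, expect, skip), (i, ch) =>
    if expect && skip && decide (ch ∈ pvClosings) then (starts, expect, skip)   -- continue
    else if expect && PySem.Chars.isspace ch then (starts, expect, false)       -- skip_closing = False; continue
    else
      let starts := if expect then PySem.Set.add starts i else starts
      let skip := if expect then false else skip
      if decide (ch ∈ pvPunct) then (starts, true, true)
      else if ch = '\n' then (starts, true, false)
      else (starts, false, skip)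

def sentence_start_char_indices_py_alt (text : String) : List Int :=
  (List.foldl pvStepB (PySem.Set.ofList [0], false, false) (PySem.List.enumerate text.toList 0)).1

-- ===== PRECONDITION & SPEC =====
def Spec_sentence_start_char_indices_py (text : String) (out : List Int) : Prop := out = sentence_start_char_indices_py_alt text
instance (text : String) (out : List Int) : Decidable (Spec_sentence_start_char_indices_py text out) := by unfold Spec_sentence_start_char_indices_py; infer_instance

-- ===== CLAIM (what is proved, stated in full; the proofs are below) =====
def Claim_equal_sentence_start_char_indices_py : Prop := ∀ (text : String), Dom_sentence_start_char_indices_py text → Spec_sentence_start_char_indices_py text (sentence_start_char_indices_py text)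

-- ===== LEMMAS AND PROOFS =====

-- B's fold, started at suffix position j with state st
def pvRunB (cs : List Char) (st : PySem.Set Int × Bool × Bool) (j : Nat) : List Int :=
  (List.foldl pvStepB st (PySem.List.enumerate (cs.drop j) (j : Int))).1

theorem pvRunB_nil (cs : List Char) (st : PySem.Set Int × Bool × Bool) (j : Nat)
    (h : cs.length ≤ j) : pvRunB cs st j = st.1 := by
  simp [pvRunB, List.drop_of_length_le h]

theorem pvRunB_step (cs : List Char) (st : PySem.Set Int × Bool × Bool) (j : Nat)
    (h : j < cs.length) :
    pvRunB cs st j = pvRunB cs (pvStepB st ((j : Int), cs.getD j ' ')) (j + 1) := by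
  unfold pvRunB
  rw [List.drop_eq_getElem_cons h, PySem.List.enumerate_cons, List.foldl_cons,
      List.getD_eq_getElem cs ' ' h]
  norm_num

theorem pvStep_eq (s : PySem.Set Int) (i : Int) (ch : Char) (h : ch ∉ pvClosings) :
    pvStepB (s, true, true) (i, ch) = pvStepB (s, true, false) (i, ch) := by
  simp [pvStepB, h]

theorem pvStep_add (s : PySem.Set Int) (i : Int) (ch : Char)
    (h : PySem.Chars.isspace ch = false) :
    pvStepB (s, true, false) (i, ch) = pvStepB (PySem.Set.add s i, false, false) (i, ch) := by
  simp [pvStepB, h]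

theorem pvStep_closing (s : PySem.Set Int) (i : Int) (ch : Char) (h : ch ∈ pvClosings) :
    pvStepB (s, true, true) (i, ch) = (s, true, true) := by
  simp [pvStepB, h]

theorem pvStep_space (s : PySem.Set Int) (i : Int) (ch : Char)
    (h : PySem.Chars.isspace ch = true) :
    pvStepB (s, true, false) (i, ch) = (s, true, false) := by
  simp [pvStepB, h]

theorem pvStep_punct (s : PySem.Set Int) (i : Int) (ch : Char) (h : ch ∈ pvPunct) :
    pvStepB (s, false, false) (i, ch) = (s, true, true) := by
  simp [pvStepB, h]

theorem pvStep_newline (s : PySem.Set Int) (i : Int) (ch : Char) (h : ch = '\n') :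
    pvStepB (s, false, false) (i, ch) = (s, true, false) := by
  subst h; simp [pvStepB]; decide

theorem pvStep_other (s : PySem.Set Int) (i : Int) (ch : Char) (h1 : ch ∉ pvPunct)
    (h2 : ch ≠ '\n') : pvStepB (s, false, false) (i, ch) = (s, false, false) := by
  simp [pvStepB, h1, h2]

theorem pvRunB_skipClosing (cs : List Char) (s : PySem.Set Int) (j : Nat) :
    pvRunB cs (s, true, true) j = pvRunB cs (s, true, false) (pvSkipClosing cs j) := by
  by_cases h : j < cs.length ∧ cs.getD j ' ' ∈ pvClosings
  · rw [pvSkipClosing, dif_pos h, pvRunB_step cs _ j h.1, pvStep_closing s _ _ h.2]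
    exact pvRunB_skipClosing cs s (j + 1)
  · rw [pvSkipClosing, dif_neg h]
    by_cases hj : j < cs.length
    · have hcl : cs.getD j ' ' ∉ pvClosings := fun hc => h ⟨hj, hc⟩
      rw [pvRunB_step cs _ j hj, pvRunB_step cs (s, true, false) j hj, pvStep_eq _ _ _ hcl]
    · rw [pvRunB_nil cs _ j (by omega), pvRunB_nil cs _ j (by omega)]
termination_by cs.length - j
decreasing_by omega

theorem pvRunB_skipSpace (cs : List Char) (s : PySem.Set Int) (j : Nat) :
    pvRunB cs (s, true, false) j = pvRunB cs (s, true, false) (pvSkipSpace cs j) := by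
  by_cases h : j < cs.length ∧ PySem.Chars.isspace (cs.getD j ' ') = true
  · rw [pvSkipSpace, dif_pos h, pvRunB_step cs _ j h.1, pvStep_space s _ _ h.2]
    exact pvRunB_skipSpace cs s (j + 1)
  · rw [pvSkipSpace, dif_neg h]
termination_by cs.length - j
decreasing_by omega

theorem pvSkipSpace_stop (cs : List Char) (j : Nat) (h : pvSkipSpace cs j < cs.length) :
    PySem.Chars.isspace (cs.getD (pvSkipSpace cs j) ' ') = false := by
  by_cases hc : j < cs.length ∧ PySem.Chars.isspace (cs.getD j ' ') = true
  · rw [pvSkipSpace, dif_pos hc] at h ⊢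
    exact pvSkipSpace_stop cs (j + 1) h
  · rw [pvSkipSpace, dif_neg hc] at h ⊢
    simp only [not_and] at hc
    have hb := hc h
    revert hb
    cases PySem.Chars.isspace (cs.getD j ' ') <;> simp
termination_by cs.length - j
decreasing_by omega

theorem pvMain (cs : List Char) (i : Nat) (s : PySem.Set Int) :
    pvLoopA cs i s = pvRunB cs (s, false, false) i := by
  rw [pvLoopA]
  split
  · next hi =>
    rw [pvRunB_step cs _ i hi]
    by_cases hp : cs.getD i ' ' ∈ pvPunct
    · rw [if_pos hp, pvStep_punct s _ _ hp, pvRunB_skipClosing, pvRunB_skipSpace]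
      show pvLoopA cs (pvSkipSpace cs (pvSkipClosing cs (i + 1)))
          (if pvSkipSpace cs (pvSkipClosing cs (i + 1)) < cs.length
            then PySem.Set.add s ((pvSkipSpace cs (pvSkipClosing cs (i + 1)) : Nat) : Int) else s) =
        pvRunB cs (s, true, false) (pvSkipSpace cs (pvSkipClosing cs (i + 1)))
      set j := pvSkipSpace cs (pvSkipClosing cs (i + 1)) with hj
      by_cases hlt : j < cs.length
      · rw [if_pos hlt, pvRunB_step cs _ j hlt,
            pvStep_add s _ _ (pvSkipSpace_stop cs (pvSkipClosing cs (i + 1)) hlt),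
            ← pvRunB_step cs _ j hlt]
        exact pvMain cs j _
      · rw [if_neg hlt, pvRunB_nil cs _ j (by omega), pvMain cs j s,
            pvRunB_nil cs _ j (by omega)]
    · by_cases hn : cs.getD i ' ' = '\n'
      · rw [if_neg hp, if_pos hn, pvStep_newline s _ _ hn, pvRunB_skipSpace]
        show pvLoopA cs (pvSkipSpace cs (i + 1))
            (if pvSkipSpace cs (i + 1) < cs.length
              then PySem.Set.add s ((pvSkipSpace cs (i + 1) : Nat) : Int) else s) =
          pvRunB cs (s, true, false) (pvSkipSpace cs (i + 1))
        set j := pvSkipSpace cs (i + 1) with hj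
        by_cases hlt : j < cs.length
        · rw [if_pos hlt, pvRunB_step cs _ j hlt,
              pvStep_add s _ _ (pvSkipSpace_stop cs (i + 1) hlt),
              ← pvRunB_step cs _ j hlt]
          exact pvMain cs j _
        · rw [if_neg hlt, pvRunB_nil cs _ j (by omega), pvMain cs j s,
              pvRunB_nil cs _ j (by omega)]
      · rw [if_neg hp, if_neg hn, pvStep_other s _ _ hp hn]
        exact pvMain cs (i + 1) s
  · next hi => rw [pvRunB_nil cs _ i (by omega)]
termination_by cs.length - i
decreasing_by
  all_goals
    (have g1 := pvSkipClosing_ge cs (i + 1);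
     have g2 := pvSkipSpace_ge cs (pvSkipClosing cs (i + 1));
     have g3 := pvSkipSpace_ge cs (i + 1);
     omega)

-- ===== VERDICT (by name: the statement is the Claim_ definition above) =====
theorem sentence_start_char_indices_py_spec : Claim_equal_sentence_start_char_indices_py := by
  intro text _
  unfold Spec_sentence_start_char_indices_py sentence_start_char_indices_py
    sentence_start_char_indices_py_alt
  rw [pvMain]
  simp [pvRunB]
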